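-- pv_equiv track=rewrite | github.com/pbell97/adventofCode | 2023/14-pt1.py | GetTableValue
-- ===== SOURCE A (Python) =====
-- def GetTableValue(table):
--     count = 0
--     lineCount = len(table[0])
--     for line in table:
--         for i,char in enumerate(line):
--             if char == "O":
--                 count += lineCount - i
--     return count
-- ===== SOURCE B (Python) =====
-- def GetTableValue(table):
--     width = len(table[0])
--     totalO = sum(line.count("O") for line in table)
--     indexSum = sum(i for line in table for i, char in enumerate(line) if char == "O")
--     return width * totalO - indexSum
-- ===== Notes on version B (the rewrite author's own statement) =====
-- stated objective: alternative
-- what changed: B replaces A's single accumulator of (width - i) per rock by the algebraic identity width*totalO - indexSum, computed in two independent passes (a per-row count pass and an index-sum pass).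
import Mathlib
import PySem

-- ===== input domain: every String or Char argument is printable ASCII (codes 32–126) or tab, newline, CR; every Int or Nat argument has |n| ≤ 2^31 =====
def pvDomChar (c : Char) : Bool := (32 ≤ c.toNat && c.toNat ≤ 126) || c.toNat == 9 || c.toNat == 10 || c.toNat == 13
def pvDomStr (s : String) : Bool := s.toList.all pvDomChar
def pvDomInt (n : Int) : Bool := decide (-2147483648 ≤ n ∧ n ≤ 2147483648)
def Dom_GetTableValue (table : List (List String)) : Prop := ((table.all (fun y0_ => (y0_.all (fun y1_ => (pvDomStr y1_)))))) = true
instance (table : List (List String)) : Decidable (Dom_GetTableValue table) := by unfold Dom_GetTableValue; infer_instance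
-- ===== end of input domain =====

-- B computes the same total as width*totalO - indexSum in two independent passes (alternative decomposition, same cost).

-- ===== PORT A =====
def GetTableValue (table : List (List String)) : Int :=
  let lineCount : Int := ((table.headD []).length : Int)
  table.foldl (fun count line =>
    (PySem.List.enumerate line).foldl (fun c p =>
      if p.2 = "O" then c + (lineCount - p.1) else c) count) 0

-- ===== PORT B =====
def GetTableValue_alt (table : List (List String)) : Int :=
  let width : Int := ((table.headD []).length : Int)
  let totalO : Int := table.foldl (fun s line => s + (line.count "O" : Int)) 0
  let indexSum : Int := table.foldl (fun s line =>
    (PySem.List.enumerate line).foldl (fun t p =>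
      if p.2 = "O" then t + p.1 else t) s) 0
  width * totalO - indexSum

-- ===== PRECONDITION & SPEC =====
-- Pre_ excludes only the empty table, on which A raises IndexError at table[0].
def Pre_GetTableValue (table : List (List String)) : Prop := table ≠ []
instance (table : List (List String)) : Decidable (Pre_GetTableValue table) := by unfold Pre_GetTableValue; infer_instance
def pvWitness_GetTableValue : List (List String) := [["O", ".", "O"], [".", "O"]]
def Spec_GetTableValue (table : List (List String)) (out : Int) : Prop := out = GetTableValue_alt table
instance (table : List (List String)) (out : Int) : Decidable (Spec_GetTableValue table out) := by unfold Spec_GetTableValue; infer_instance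

-- ===== CLAIM (what is proved, stated in full; the proofs are below) =====
def Claim_equal_GetTableValue : Prop := ∀ (table : List (List String)), Dom_GetTableValue table → Pre_GetTableValue table → Spec_GetTableValue table (GetTableValue table)

-- ===== LEMMAS AND PROOFS =====

theorem pv_idx_shift (line : List String) (s c : Int) :
    (PySem.List.enumerate line s).foldl (fun t p => if p.2 = "O" then t + p.1 else t) c
      = c + (PySem.List.enumerate line s).foldl (fun t p => if p.2 = "O" then t + p.1 else t) 0 := by
  induction line generalizing s c with
  | nil => simp [PySem.List.enumerate_nil]
  | cons x xs ih =>
    simp only [PySem.List.enumerate_cons, List.foldl_cons]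
    by_cases h : x = "O"
    · simp only [h, if_true]
      rw [ih (s+1) (c+s), ih (s+1) (0+s)]
      ring
    · simp only [h, if_false]
      exact ih (s+1) c

theorem pv_inner (w : Int) (line : List String) (s c : Int) :
    (PySem.List.enumerate line s).foldl (fun t p => if p.2 = "O" then t + (w - p.1) else t) c
      = c + w * (line.count "O" : Int)
          - (PySem.List.enumerate line s).foldl (fun t p => if p.2 = "O" then t + p.1 else t) 0 := by
  induction line generalizing s c with
  | nil => simp [PySem.List.enumerate_nil]
  | cons x xs ih =>
    have hc : ((x :: xs).count "O" : Int) = (xs.count "O" : Int) + (if x = "O" then 1 else 0) := by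
      by_cases h : x = "O" <;> simp [h]
    simp only [PySem.List.enumerate_cons, List.foldl_cons, hc]
    by_cases h : x = "O"
    · simp only [h, if_true]
      rw [ih (s+1) (c+(w-s)), pv_idx_shift xs (s+1) (0+s)]
      ring
    · simp only [h, if_false]
      rw [ih (s+1) c]
      ring

-- count pass shifts with its accumulator
theorem pv_cnt_shift (table : List (List String)) (c : Int) :
    table.foldl (fun s line => s + (line.count "O" : Int)) c
      = c + table.foldl (fun s line => s + (line.count "O" : Int)) 0 := by
  induction table generalizing c with
  | nil => simp
  | cons x xs ih =>
    simp only [List.foldl_cons]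
    rw [ih (c + _), ih ((0:Int) + _)]; ring

-- index-sum pass shifts with its accumulator
theorem pv_sum_shift (table : List (List String)) (c : Int) :
    table.foldl (fun s line => (PySem.List.enumerate line).foldl (fun t p => if p.2 = "O" then t + p.1 else t) s) c
      = c + table.foldl (fun s line => (PySem.List.enumerate line).foldl (fun t p => if p.2 = "O" then t + p.1 else t) s) 0 := by
  induction table generalizing c with
  | nil => simp
  | cons x xs ih =>
    simp only [List.foldl_cons]
    rw [pv_idx_shift x 0 c, ih, pv_idx_shift x 0 0, ih (0 + _)]
    ring

-- outer fold identity
theorem pv_outer (w : Int) (table : List (List String)) (c : Int) :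
    table.foldl (fun count line =>
        (PySem.List.enumerate line).foldl (fun t p => if p.2 = "O" then t + (w - p.1) else t) count) c
      = c + w * table.foldl (fun s line => s + (line.count "O" : Int)) 0
          - table.foldl (fun s line => (PySem.List.enumerate line).foldl (fun t p => if p.2 = "O" then t + p.1 else t) s) 0 := by
  induction table generalizing c with
  | nil => simp
  | cons x xs ih =>
    simp only [List.foldl_cons]
    rw [pv_inner w x 0 c, ih, pv_cnt_shift xs ((0:Int) + (x.count "O" : Int)),
        pv_sum_shift xs ((PySem.List.enumerate x 0).foldl (fun t p => if p.2 = "O" then t + p.1 else t) 0)]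
    ring

-- ===== VERDICT (by name: the statement is the Claim_ definition above) =====
theorem GetTableValue_spec : Claim_equal_GetTableValue := by
  intro table _ _
  unfold Spec_GetTableValue GetTableValue GetTableValue_alt
  simp only
  rw [pv_outer]
  ring
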